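-- pv_equiv track=rewrite | github.com/GreyMyers/EEG-Neural-Network | src/extract_physionet.py | find_channel_indices
-- ===== SOURCE A (Python) =====
-- TARGET_CHANNELS = {
--     'C3': None,  # Will be set after reading file
--     'C4': None,
--     'Fp1': None,
--     'Fp2': None
-- }
--
-- def find_channel_indices(channel_labels):
--     """
--     Find indices of C3, C4, Fp1, Fp2 in the channel labels.
--     Handles PhysioNet naming conventions (e.g., 'C3..', 'Fc5.')
--
--     Args:
--         channel_labels: List of channel names from the EDF file
--
--     Returns:
--         dict mapping channel names to indices
--     """
--     channel_map = {}
--     for target in TARGET_CHANNELS.keys():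
--         found = False
--
--         # Try exact match first
--         if target in channel_labels:
--             channel_map[target] = channel_labels.index(target)
--             found = True
--         else:
--             # Try case-insensitive exact match
--             target_lower = target.lower()
--             for i, label in enumerate(channel_labels):
--                 if label.lower() == target_lower:
--                     channel_map[target] = i
--                     found = True
--                     break
--
--             if not found:
--                 # Try matching with trailing periods (PhysioNet uses 'C3..', 'Fc5.', etc.)
--                 # Strip periods from both for comparison
--                 target_clean = target.upper().rstrip('.')
--                 for i, label in enumerate(channel_labels):
--                     label_clean = label.upper().rstrip('.')
--                     if label_clean == target_clean:
--                         channel_map[target] = i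
--                         found = True
--                         break
--
--                 if not found:
--                     # Try partial match (e.g., "C3.." contains "C3")
--                     target_upper = target.upper()
--                     for i, label in enumerate(channel_labels):
--                         label_upper = label.upper().rstrip('.')
--                         if target_upper in label_upper or label_upper.startswith(target_upper):
--                             channel_map[target] = i
--                             found = True
--                             break
--
--         if not found:
--             # Channel not found - will be handled by caller
--             pass
--
--     return channel_map
-- ===== SOURCE B (Python) =====
-- TARGETS = ('C3', 'C4', 'Fp1', 'Fp2')
--
--
-- def _tier(target, label):
--     """Match quality of label for target: 0 best .. 3 worst, None if no match."""
--     if label == target: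
--         return 0
--     if label.lower() == target.lower():
--         return 1
--     if label.upper().rstrip('.') == target.upper():
--         return 2
--     if target.upper() in label.upper().rstrip('.'):
--         return 3
--     return None
--
--
-- def find_channel_indices(channel_labels):
--     # Single pass over the labels: for each target keep the lexicographically
--     # smallest (tier, index) seen so far (strictly better tier wins; ties keep
--     # the earlier index, which the left-to-right scan gives for free).
--     best = {t: None for t in TARGETS}
--     for i, label in enumerate(channel_labels):
--         for t in TARGETS:
--             k = _tier(t, label)
--             if k is not None and (best[t] is None or k < best[t][0]):
--                 best[t] = (k, i)
--     return {t: b[1] for t, b in best.items() if b is not None}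
-- ===== Notes on version B (the rewrite author's own statement) =====
-- stated objective: alternative
-- what changed: A makes up to four staged scans over the label list per target; B makes a single left-to-right pass over the labels, maintaining for each target the lexicographically least (match-tier, index) accumulator, and reads the result off the accumulator.
import Mathlib
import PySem

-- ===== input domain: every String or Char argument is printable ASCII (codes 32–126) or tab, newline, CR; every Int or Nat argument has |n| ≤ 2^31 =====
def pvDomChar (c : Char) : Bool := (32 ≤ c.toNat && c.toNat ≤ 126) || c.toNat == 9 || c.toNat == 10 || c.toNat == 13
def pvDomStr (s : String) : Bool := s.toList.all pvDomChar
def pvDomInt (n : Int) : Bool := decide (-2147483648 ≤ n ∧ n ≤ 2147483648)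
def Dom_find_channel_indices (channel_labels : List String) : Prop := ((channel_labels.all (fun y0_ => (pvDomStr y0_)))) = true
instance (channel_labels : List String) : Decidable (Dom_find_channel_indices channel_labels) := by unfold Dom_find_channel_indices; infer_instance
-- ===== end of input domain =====

-- B replaces A's per-target staged scans (up to four passes over the list per target)
-- by ONE left-to-right pass over the labels that maintains, per target, the
-- lexicographically least (match-tier, index) seen so far (objective: alternative).

-- hand port of Python's s.rstrip('.'): drop trailing '.' characters only (exact:
-- a finite literal strip set, no PySem primitive covers rstrip with an argument)
def rstripDots (s : String) : String :=
  String.ofList ((s.toList.reverse.dropWhile (· == '.')).reverse)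

-- ===== PORT A =====
def fciTargets : List String := ["C3", "C4", "Fp1", "Fp2"]

-- A's second loop: case-insensitive exact match over enumerate(channel_labels)
def fciLoopLower (tl : String) : List (Int × String) → Option Int
  | [] => none
  | (i, label) :: rest =>
      if PySem.Str.lower label == tl then some i else fciLoopLower tl rest

-- A's third loop: uppercase period-stripped equality over enumerate(channel_labels)
def fciLoopClean (tc : String) : List (Int × String) → Option Int
  | [] => none
  | (i, label) :: rest =>
      if rstripDots (PySem.Str.upper label) == tc then some i else fciLoopClean tc rest

-- A's fourth loop: partial match (containment or prefix) over enumerate(channel_labels)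
def fciLoopPartial (tu : String) : List (Int × String) → Option Int
  | [] => none
  | (i, label) :: rest =>
      let lu := rstripDots (PySem.Str.upper label)
      if PySem.Str.isIn tu lu || PySem.Str.startswith lu tu then some i
      else fciLoopPartial tu rest

-- A's per-target cascade: exact membership/index, then the three fallback loops
def fciResolveA (target : String) (channel_labels : List String) : Option Int :=
  match PySem.List.index? channel_labels target with
  | some i => some (i : Int)
  | none =>
    match fciLoopLower (PySem.Str.lower target) (PySem.List.enumerate channel_labels) with
    | some i => some i
    | none =>
      match fciLoopClean (rstripDots (PySem.Str.upper target)) (PySem.List.enumerate channel_labels) with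
      | some i => some i
      | none => fciLoopPartial (PySem.Str.upper target) (PySem.List.enumerate channel_labels)

def find_channel_indices (channel_labels : List String) : List (String × Int) :=
  (fciTargets.foldl (fun d target =>
      match fciResolveA target channel_labels with
      | some i => d.insert target i
      | none => d)
    (PySem.Dict.empty : PySem.Dict String Int)).items

-- ===== PORT B =====
-- Source B's _tier: match quality of label for target, 0 best .. 3 worst, none if no match
def fciTier (target label : String) : Option Nat :=
  if label == target then some 0
  else if PySem.Str.lower label == PySem.Str.lower target then some 1
  else if rstripDots (PySem.Str.upper label) == PySem.Str.upper target then some 2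
  else if PySem.Str.isIn (PySem.Str.upper target) (rstripDots (PySem.Str.upper label)) then some 3
  else none

-- Source B's inner update: replace the stored best when this label's tier is strictly better
def fciUpd (b : Option (Nat × Int)) (k? : Option Nat) (i : Int) : Option (Nat × Int) :=
  match k? with
  | none => b
  | some k =>
      match b with
      | none => some (k, i)
      | some (bk, _) => if k < bk then some (k, i) else b

def find_channel_indices_alt (channel_labels : List String) : List (String × Int) :=
  let best := (PySem.List.enumerate channel_labels).foldl
    (fun st (p : Int × String) =>
      st.map (fun tb => (tb.1, fciUpd tb.2 (fciTier tb.1 p.2) p.1)))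
    (["C3", "C4", "Fp1", "Fp2"].map (fun t => (t, (none : Option (Nat × Int)))))
  best.filterMap (fun tb => tb.2.map (fun q => (tb.1, q.2)))

-- ===== PRECONDITION & SPEC =====
def Spec_find_channel_indices (channel_labels : List String) (out : List (String × Int)) : Prop := out = find_channel_indices_alt channel_labels
instance (channel_labels : List String) (out : List (String × Int)) : Decidable (Spec_find_channel_indices channel_labels out) := by unfold Spec_find_channel_indices; infer_instance

-- ===== CLAIM (what is proved, stated in full; the proofs are below) =====
def Claim_equal_find_channel_indices : Prop := ∀ (channel_labels : List String), Dom_find_channel_indices channel_labels → Spec_find_channel_indices channel_labels (find_channel_indices channel_labels)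

-- ===== LEMMAS AND PROOFS =====

-- A's four tier predicates, in order (tier 4 without the redundant startswith disjunct)
def fciTierPreds (t : String) : List (String → Bool) :=
  [fun l => l == t,
   fun l => PySem.Str.lower l == PySem.Str.lower t,
   fun l => rstripDots (PySem.Str.upper l) == PySem.Str.upper t,
   fun l => PySem.Str.isIn (PySem.Str.upper t) (rstripDots (PySem.Str.upper l))]

-- first index (0-based) whose label satisfies p
def fciFirstIdx (p : String → Bool) : List String → Option Int
  | [] => none
  | l :: ls => if p l then some 0 else (fciFirstIdx p ls).map (· + 1)

-- staged-scan value: first tier (numbered from k0) with a match, with its first index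
def fciTscan : List (String → Bool) → List String → Nat → Option (Nat × Int)
  | [], _, _ => none
  | p :: ps, ls, k0 =>
      match fciFirstIdx p ls with
      | some i => some (k0, i)
      | none => fciTscan ps ls (k0 + 1)

-- combining operators used to state the single-pass invariant
def fciMix (k? : Option Nat) (m : Option (Nat × Int)) : Option (Nat × Int) :=
  match k? with
  | none => m
  | some k =>
      match m with
      | none => some (k, 0)
      | some (k', i') => if k' < k then some (k', i') else some (k, 0)

def fciComb (b m : Option (Nat × Int)) : Option (Nat × Int) :=
  match m with
  | none => b
  | some (k, i) => fciUpd b (some k) i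

-- ---------- A-side lemmas (cascade = staged scans over the tier predicates) ----------

theorem fciFirstIdx_eq_index? (t : String) (ls : List String) :
    fciFirstIdx (fun l => l == t) ls = (PySem.List.index? ls t).map (fun n => (n : Int)) := by
  induction ls with
  | nil => simp [fciFirstIdx, PySem.List.index?]
  | cons x xs ih =>
      by_cases h : x = t
      · subst h; rw [PySem.List.index?_cons_self]; simp [fciFirstIdx]
      · rw [PySem.List.index?_cons_of_ne xs h]
        have hb : (x == t) = false := by simp [h]
        simp only [fciFirstIdx, hb, ih]
        rcases PySem.List.index? xs t with _ | n <;> simp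

theorem fciLoopLower_eq (tl : String) (ls : List String) (s : Int) :
    fciLoopLower tl (PySem.List.enumerate ls s)
      = (fciFirstIdx (fun l => PySem.Str.lower l == tl) ls).map (· + s) := by
  induction ls generalizing s with
  | nil => simp [fciLoopLower, fciFirstIdx, PySem.List.enumerate_nil]
  | cons x xs ih =>
      rw [PySem.List.enumerate_cons]
      by_cases h : PySem.Str.lower x == tl
      · simp [fciLoopLower, fciFirstIdx, h]
      · simp only [fciLoopLower, fciFirstIdx, h, ih]
        rcases fciFirstIdx (fun l => PySem.Str.lower l == tl) xs with _ | n <;> simp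
        ring

theorem fciLoopClean_eq (tc : String) (ls : List String) (s : Int) :
    fciLoopClean tc (PySem.List.enumerate ls s)
      = (fciFirstIdx (fun l => rstripDots (PySem.Str.upper l) == tc) ls).map (· + s) := by
  induction ls generalizing s with
  | nil => simp [fciLoopClean, fciFirstIdx, PySem.List.enumerate_nil]
  | cons x xs ih =>
      rw [PySem.List.enumerate_cons]
      by_cases h : rstripDots (PySem.Str.upper x) == tc
      · simp [fciLoopClean, fciFirstIdx, h]
      · simp only [fciLoopClean, fciFirstIdx, h, ih]
        rcases fciFirstIdx (fun l => rstripDots (PySem.Str.upper l) == tc) xs with _ | n <;> simp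
        ring

-- A's 'tu in lu or lu.startswith(tu)': the prefix disjunct is subsumed by containment
theorem isIn_or_startswith (sub s : String) :
    (PySem.Str.isIn sub s || PySem.Str.startswith s sub) = PySem.Str.isIn sub s := by
  cases hps : PySem.Str.startswith s sub
  · simp
  · have hin : PySem.Str.isIn sub s = true := by
      rw [PySem.Str.isIn_iff_infix]
      exact ((PySem.Chars.startswith_iff _ _).mp (by simpa using hps)).isInfix
    rw [hin]; simp

theorem fciLoopPartial_eq (tu : String) (ls : List String) (s : Int) :
    fciLoopPartial tu (PySem.List.enumerate ls s)
      = (fciFirstIdx (fun l => PySem.Str.isIn tu (rstripDots (PySem.Str.upper l))) ls).map (· + s) := by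
  induction ls generalizing s with
  | nil => simp [fciLoopPartial, fciFirstIdx, PySem.List.enumerate_nil]
  | cons x xs ih =>
      rw [PySem.List.enumerate_cons]
      simp only [fciLoopPartial, isIn_or_startswith]
      by_cases h : PySem.Str.isIn tu (rstripDots (PySem.Str.upper x)) = true
      · simp only [fciFirstIdx, h, if_pos]
        simp
      · simp only [fciFirstIdx, h, ih]
        rcases fciFirstIdx (fun l => PySem.Str.isIn tu (rstripDots (PySem.Str.upper l))) xs with _ | n <;> simp
        ring

-- per-target: A's cascade is the staged scan over the tier predicates (dot-free targets)
theorem fciResolve_eq (t : String) (ls : List String)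
    (ht : rstripDots (PySem.Str.upper t) = PySem.Str.upper t) :
    fciResolveA t ls = (fciTierPreds t).findSome? (fun p => fciFirstIdx p ls) := by
  simp only [fciTierPreds, List.findSome?_cons, List.findSome?_nil]
  rw [fciResolveA, fciFirstIdx_eq_index? t ls, fciLoopLower_eq (PySem.Str.lower t) ls 0,
    fciLoopClean_eq (rstripDots (PySem.Str.upper t)) ls 0,
    fciLoopPartial_eq (PySem.Str.upper t) ls 0, ht]
  rcases PySem.List.index? ls t with _ | i <;>
    rcases h2 : fciFirstIdx (fun l => PySem.Str.lower l == PySem.Str.lower t) ls with _ | j <;>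
      rcases h3 : fciFirstIdx (fun l => rstripDots (PySem.Str.upper l) == PySem.Str.upper t) ls with _ | k <;>
        rcases h4 : fciFirstIdx (fun l => PySem.Str.isIn (PySem.Str.upper t) (rstripDots (PySem.Str.upper l))) ls with _ | m <;>
          simp

-- A's conditional-insert fold over fresh distinct keys appends its hits in order
theorem foldl_insertOpt_items (r : String → Option Int) :
    ∀ (ts : List String) (d : PySem.Dict String Int),
      (∀ t ∈ ts, d.contains t = false) → ts.Nodup →
      (ts.foldl (fun d t =>
          match r t with
          | some i => d.insert t i
          | none => d) d).items
        = d.items ++ ts.filterMap (fun t => (r t).map (fun i => (t, i))) := by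
  intro ts
  induction ts with
  | nil => intro d _ _; simp
  | cons t rest ih =>
      intro d hfresh hnd
      rcases List.nodup_cons.mp hnd with ⟨hnm, hndr⟩
      rcases h : r t with _ | i
      · simp only [List.foldl_cons, h]
        rw [ih d (fun u hu => hfresh u (List.mem_cons_of_mem _ hu)) hndr]
        simp [h]
      · simp only [List.foldl_cons, h]
        have hA := hfresh t (List.mem_cons_self ..)
        rw [ih (d.insert t i)
            (fun u hu => by
              rw [PySem.Dict.contains_insert]
              have : u ≠ t := fun he => hnm (he ▸ hu)
              simp [this, hfresh u (List.mem_cons_of_mem _ hu)])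
            hndr]
        rw [PySem.Dict.items_insert_of_not_contains d i hA]
        simp [h]

-- ---------- B-side lemmas (single pass = staged scans) ----------

-- index of the first satisfied predicate of an ordered tier list
def fciTierIn : List (String → Bool) → String → Option Nat
  | [], _ => none
  | p :: ps, l => if p l then some 0 else (fciTierIn ps l).map (· + 1)

-- Source B's if-chain tier equals the first satisfied predicate of the ordered tier list
theorem fciTier_eq_findIdx (t l : String) :
    fciTier t l = fciTierIn (fciTierPreds t) l := by
  unfold fciTier fciTierPreds
  by_cases h1 : l == t <;> by_cases h2 : PySem.Str.lower l == PySem.Str.lower t <;>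
    by_cases h3 : rstripDots (PySem.Str.upper l) == PySem.Str.upper t <;>
      by_cases h4 : PySem.Str.isIn (PySem.Str.upper t) (rstripDots (PySem.Str.upper l)) <;>
        simp_all [fciTierIn]

theorem fciTscan_ge : ∀ (ps : List (String → Bool)) (ls : List String) (k0 k : Nat) (i : Int),
    fciTscan ps ls k0 = some (k, i) → k0 ≤ k := by
  intro ps
  induction ps with
  | nil => intro ls k0 k i h; simp [fciTscan] at h
  | cons p ps ih =>
      intro ls k0 k i h
      simp only [fciTscan] at h
      rcases hf : fciFirstIdx p ls with _ | j <;> rw [hf] at h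
      · exact Nat.le_of_succ_le (ih ls (k0 + 1) k i h)
      · simp at h; omega

-- peeling one label off the staged scan
theorem fciTscan_cons (x : String) (xs : List String) :
    ∀ (ps : List (String → Bool)) (k0 : Nat),
    fciTscan ps (x :: xs) k0
      = fciMix ((fciTierIn ps x).map (· + k0))
          ((fciTscan ps xs k0).map (fun q => (q.1, q.2 + 1))) := by
  intro ps
  induction ps with
  | nil => intro k0; simp [fciTscan, fciTierIn, fciMix]
  | cons p ps ih =>
      intro k0
      by_cases hp : p x
      · have h1 : fciTscan (p :: ps) (x :: xs) k0 = some (k0, 0) := by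
          simp [fciTscan, fciFirstIdx, hp]
        have h2 : fciTierIn (p :: ps) x = some 0 := by simp [fciTierIn, hp]
        rw [h1, h2]
        rcases hm : fciTscan (p :: ps) xs k0 with _ | ⟨k, i⟩
        · simp [fciMix]
        · have hk := fciTscan_ge _ xs k0 k i hm
          simp only [Option.map_some, fciMix]
          rw [if_neg (by omega)]
          simp
      · have hpb : p x = false := by simpa using hp
        have h2 : fciTierIn (p :: ps) x = (fciTierIn ps x).map (· + 1) := by
          simp [fciTierIn, hpb]
        have h1 : fciFirstIdx p (x :: xs) = (fciFirstIdx p xs).map (· + 1) := by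
          simp [fciFirstIdx, hpb]
        rcases hf : fciFirstIdx p xs with _ | i
        · have hL : fciTscan (p :: ps) (x :: xs) k0 = fciTscan ps (x :: xs) (k0 + 1) := by
            simp [fciTscan, h1, hf]
          have hR : fciTscan (p :: ps) xs k0 = fciTscan ps xs (k0 + 1) := by
            simp [fciTscan, hf]
          rw [hL, hR, ih (k0 + 1), h2]
          congr 1
          rcases fciTierIn ps x with _ | n <;> simp
          omega
        · have hL : fciTscan (p :: ps) (x :: xs) k0 = some (k0, i + 1) := by
            simp [fciTscan, h1, hf]
          have hR : fciTscan (p :: ps) xs k0 = some (k0, i) := by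
            simp [fciTscan, hf]
          rw [hL, hR, h2]
          rcases fciTierIn ps x with _ | n
          · simp [fciMix]
          · simp only [Option.map_some, fciMix]
            rw [if_pos (by omega)]

theorem fciTscan_nil : ∀ (ps : List (String → Bool)) (k0 : Nat), fciTscan ps [] k0 = none := by
  intro ps
  induction ps with
  | nil => intro k0; simp [fciTscan]
  | cons p ps ih => intro k0; simp [fciTscan, fciFirstIdx, ih]

-- the single-pass fold computes the staged-scan value (with accumulator b, start s)
theorem fciFold_eq (t : String) : ∀ (ls : List String) (b : Option (Nat × Int)) (s : Int),
    (PySem.List.enumerate ls s).foldl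
        (fun b (p : Int × String) => fciUpd b (fciTier t p.2) p.1) b
      = fciComb b ((fciTscan (fciTierPreds t) ls 0).map (fun q => (q.1, q.2 + s))) := by
  intro ls
  induction ls with
  | nil => intro b s; simp [PySem.List.enumerate_nil, fciTscan_nil, fciComb]
  | cons x xs ih =>
      intro b s
      rw [PySem.List.enumerate_cons]
      simp only [List.foldl_cons]
      rw [ih (fciUpd b (fciTier t x) s) (s + 1)]
      rw [fciTscan_cons x xs (fciTierPreds t) 0]
      rw [fciTier_eq_findIdx]
      have hid : (fciTierIn (fciTierPreds t) x).map (· + 0)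
          = fciTierIn (fciTierPreds t) x := by
        rcases fciTierIn (fciTierPreds t) x with _ | n <;> simp
      rw [hid]
      rcases fciTierIn (fciTierPreds t) x with _ | k <;>
        rcases fciTscan (fciTierPreds t) xs 0 with _ | ⟨k', i'⟩ <;>
          rcases b with _ | ⟨bk, bi⟩ <;>
            simp only [fciMix, fciComb, fciUpd, Option.map_some, Option.map_none] <;>
              (try split_ifs) <;> (try simp) <;> (try split_ifs) <;>
                (try simp) <;> (try omega)

-- the staged scan's index component is the findSome? over the tier scans
theorem fciTscan_snd : ∀ (ps : List (String → Bool)) (ls : List String) (k0 : Nat),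
    (fciTscan ps ls k0).map (fun q => q.2) = ps.findSome? (fun p => fciFirstIdx p ls) := by
  intro ps
  induction ps with
  | nil => intro ls k0; simp [fciTscan]
  | cons p ps ih =>
      intro ls k0
      simp only [fciTscan, List.findSome?_cons]
      rcases fciFirstIdx p ls with _ | i
      · exact ih ls (k0 + 1)
      · simp

-- the fold over the 4-entry state list acts independently per target
theorem fciStateFold (es : List (Int × String)) :
    ∀ (ts : List String) (h : String → Option (Nat × Int)),
    es.foldl
        (fun st (p : Int × String) =>
          st.map (fun tb => (tb.1, fciUpd tb.2 (fciTier tb.1 p.2) p.1)))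
        (ts.map (fun t => (t, h t)))
      = ts.map (fun t => (t, es.foldl (fun b (p : Int × String) => fciUpd b (fciTier t p.2) p.1) (h t))) := by
  induction es with
  | nil => intro ts h; simp
  | cons e es ih =>
      intro ts h
      simp only [List.foldl_cons, List.map_map]
      have h1 : List.map ((fun tb => (tb.1, fciUpd tb.2 (fciTier tb.1 e.2) e.1)) ∘ fun t => (t, h t)) ts
          = ts.map (fun t => (t, fciUpd (h t) (fciTier t e.2) e.1)) := rfl
      rw [h1, ih ts (fun t => fciUpd (h t) (fciTier t e.2) e.1)]

-- ===== VERDICT (by name: the statement is the Claim_ definition above) =====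
theorem find_channel_indices_spec : Claim_equal_find_channel_indices := by
  intro ls _
  unfold Spec_find_channel_indices find_channel_indices find_channel_indices_alt
  rw [foldl_insertOpt_items (fun t => fciResolveA t ls) fciTargets PySem.Dict.empty
      (by intro t _; exact PySem.Dict.contains_empty ..) (by decide)]
  have he : (PySem.Dict.empty : PySem.Dict String Int).items = [] := rfl
  rw [he, List.nil_append]
  rw [fciStateFold (PySem.List.enumerate ls) ["C3", "C4", "Fp1", "Fp2"]
      (fun _ => (none : Option (Nat × Int)))]
  rw [List.filterMap_map]
  simp only [fciTargets]
  have hper : ∀ t ∈ ["C3", "C4", "Fp1", "Fp2"],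
      (fciResolveA t ls).map (fun i => (t, i))
        = ((PySem.List.enumerate ls).foldl
            (fun b (p : Int × String) => fciUpd b (fciTier t p.2) p.1)
            (none : Option (Nat × Int))).map (fun q => (t, q.2)) := by
    intro t htm
    have ht : rstripDots (PySem.Str.upper t) = PySem.Str.upper t := by
      fin_cases htm <;> decide
    rw [fciResolve_eq t ls ht, ← fciTscan_snd (fciTierPreds t) ls 0]
    have he0 : PySem.List.enumerate ls = PySem.List.enumerate ls 0 := rfl
    rw [he0, fciFold_eq t ls none 0]
    have hcomb : ∀ m : Option (Nat × Int), fciComb none m = m := by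
      intro m; rcases m with _ | ⟨k, i⟩ <;> simp [fciComb, fciUpd]
    rw [hcomb]
    rcases fciTscan (fciTierPreds t) ls 0 with _ | ⟨k, i⟩ <;> simp
  simp only [List.filterMap_cons, Function.comp]
  rw [← hper "C3" (by simp), ← hper "C4" (by simp), ← hper "Fp1" (by simp), ← hper "Fp2" (by simp)]
  rcases fciResolveA "C3" ls with _ | i1 <;> rcases fciResolveA "C4" ls with _ | i2 <;>
    rcases fciResolveA "Fp1" ls with _ | i3 <;> rcases fciResolveA "Fp2" ls with _ | i4 <;> simp
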